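-- pv_equiv track=rewrite | github.com/arthurzengg/coding_q | SnowFlake/q1.py | calculateWays
-- ===== SOURCE A (Python) =====
-- def calculateWays(wordLen, maxVowels):
--     MOD = 10 ** 9 + 7
--     # If maxVowels >= wordLen, there is no restriction
--     if maxVowels >= wordLen:
--         return pow(26, wordLen, MOD)
--
--     dp = [[0] * (maxVowels + 1) for _ in range(wordLen + 1)]
--     dp[0][0] = 1
--
--     for pos in range(1, wordLen + 1):
--         # Ways to end with a consonant
--         total_prev = sum(dp[pos - 1]) % MOD
--         dp[pos][0] = (total_prev * 21) % MOD
--         # Ways to end with cv consecutive vowels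
--         for cv in range(1, maxVowels + 1):
--             dp[pos][cv] = (dp[pos - 1][cv - 1] * 5) % MOD
--
--     total_ways = sum(dp[wordLen]) % MOD
--     return total_ways
-- ===== SOURCE B (Python) =====
-- def calculateWays(wordLen, maxVowels):
--     MOD = 10 ** 9 + 7
--     # No restriction at all when runs can never exceed the bound
--     if maxVowels >= wordLen:
--         return pow(26, wordLen, MOD)
--     # Linear recurrence on totals T(n) = number of valid strings of length n:
--     #   T(n) = 26*T(n-1)                               for n <= maxVowels
--     #   T(n) = 26*T(n-1) - 5^(maxVowels+1)             for n == maxVowels+1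
--     #   T(n) = 26*T(n-1) - 21*5^(maxVowels+1)*T(n-maxVowels-2)  for n >= maxVowels+2
--     p5 = pow(5, maxVowels + 1, MOD)
--     T = [1]
--     for n in range(1, wordLen + 1):
--         t = 26 * T[n - 1]
--         if n == maxVowels + 1:
--             t -= p5
--         elif n > maxVowels + 1:
--             t -= 21 * p5 * T[n - maxVowels - 2]
--         T.append(t % MOD)
--     return T[wordLen]
-- ===== Notes on version B (the rewrite author's own statement) =====
-- stated objective: alternative
-- what changed: B replaces A's two-dimensional DP over (position, current vowel-run length) with the equivalent two-term linear recurrence on the totals T(n) = 26*T(n-1) - 21*5^(maxVowels+1)*T(n-maxVowels-2) (plain 26*T(n-1) before position maxVowels+1 and a single -5^(maxVowels+1) correction at position maxVowels+1), keeping one value per position instead of a whole row.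
import Mathlib
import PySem

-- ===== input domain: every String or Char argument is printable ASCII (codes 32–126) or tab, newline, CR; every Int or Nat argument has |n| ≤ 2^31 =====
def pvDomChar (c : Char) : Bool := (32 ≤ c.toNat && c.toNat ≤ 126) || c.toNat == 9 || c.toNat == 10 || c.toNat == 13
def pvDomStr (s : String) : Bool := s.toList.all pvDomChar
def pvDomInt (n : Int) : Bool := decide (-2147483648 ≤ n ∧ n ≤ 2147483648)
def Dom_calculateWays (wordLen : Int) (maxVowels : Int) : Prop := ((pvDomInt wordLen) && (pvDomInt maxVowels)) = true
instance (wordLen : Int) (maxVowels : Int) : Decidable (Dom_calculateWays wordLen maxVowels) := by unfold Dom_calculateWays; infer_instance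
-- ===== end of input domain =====

-- B replaces A's row-by-row DP table over (position, vowel-run length) with the two-term
-- linear recurrence T(n) = 26*T(n-1) - 21*5^(maxVowels+1)*T(n-maxVowels-2) on the totals,
-- keeping one value per position instead of a whole row (alternative algorithm).

-- Shared port of Python's built-in three-argument pow (both Pythons call it):
-- binary exponentiation modulo m.  For e = 0 Python returns 1 % m.
def pvPowNatMod (b : Int) (e : Nat) (m : Int) : Int :=
  if h : e = 0 then 1 % m
  else
    let half := pvPowNatMod b (e / 2) m
    let sq := half * half % m
    if e % 2 = 1 then sq * (b % m) % m else sq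
decreasing_by exact Nat.div_lt_self (Nat.pos_of_ne_zero h) (by norm_num)

-- pow(b, e, m) for Int e.  For a negative exponent Python first inverts b modulo m
-- (raising unless gcd(b, m) = 1); here m = 10^9+7 is PRIME and the only bases reached
-- are 26 and 5, so Python's extended-gcd inverse equals the Fermat inverse
-- b^(m-2) mod m (both are the unique inverse of b in [0, m)); exact on those inputs.
def pyPowMod (b : Int) (e : Int) (m : Int) : Int :=
  if 0 ≤ e then pvPowNatMod b e.toNat m
  else pvPowNatMod (pvPowNatMod b (m - 2).toNat m) (-e).toNat m

-- ===== PORT A =====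
-- Lean's `%` on Int is emod, which agrees with Python's `%` for the positive modulus used here.
def calculateWays (wordLen : Int) (maxVowels : Int) : Int :=
  let MOD : Int := 10 ^ 9 + 7
  if maxVowels ≥ wordLen then
    pyPowMod 26 wordLen MOD
  else
    let dp : List (List Int) :=
      List.replicate (wordLen + 1).toNat (List.replicate (maxVowels + 1).toNat 0)
    -- dp[0][0] = 1  (IndexError when the rows are empty, i.e. maxVowels < 0: outside Pre_)
    let dp := PySem.List.pySetD dp 0 (PySem.List.pySetD (PySem.List.pyGetD dp 0 []) 0 1)
    let dp := (PySem.List.pyRange 1 (wordLen + 1) 1).foldl (fun dp pos =>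
      -- total_prev = sum(dp[pos - 1]) % MOD
      let total_prev := (PySem.List.pyGetD dp (pos - 1) []).sum % MOD
      -- dp[pos][0] = (total_prev * 21) % MOD
      let dp := PySem.List.pySetD dp pos
        (PySem.List.pySetD (PySem.List.pyGetD dp pos []) 0 ((total_prev * 21) % MOD))
      -- for cv in range(1, maxVowels + 1): dp[pos][cv] = (dp[pos - 1][cv - 1] * 5) % MOD
      (PySem.List.pyRange 1 (maxVowels + 1) 1).foldl (fun dp cv =>
        PySem.List.pySetD dp pos
          (PySem.List.pySetD (PySem.List.pyGetD dp pos []) cv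
            ((PySem.List.pyGetD (PySem.List.pyGetD dp (pos - 1) []) (cv - 1) 0 * 5) % MOD))) dp) dp
    (PySem.List.pyGetD dp wordLen []).sum % MOD

-- ===== PORT B =====
def calculateWays_alt (wordLen : Int) (maxVowels : Int) : Int :=
  let MOD : Int := 10 ^ 9 + 7
  if maxVowels ≥ wordLen then
    pyPowMod 26 wordLen MOD
  else
    let p5 := pyPowMod 5 (maxVowels + 1) MOD
    let T : List Int := [1]
    let T := (PySem.List.pyRange 1 (wordLen + 1) 1).foldl (fun T n =>
      let t := 26 * PySem.List.pyGetD T (n - 1) 0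
      let t := if n = maxVowels + 1 then t - p5
               else if n > maxVowels + 1 then
                 t - 21 * p5 * PySem.List.pyGetD T (n - maxVowels - 2) 0
               else t
      T ++ [t % MOD]) T
    PySem.List.pyGetD T wordLen 0

-- ===== PRECONDITION & SPEC =====
-- Pre_ excludes exactly the inputs where A raises: with maxVowels < wordLen and
-- maxVowels < 0 the dp rows are empty and `dp[0][0] = 1` raises IndexError.
def Pre_calculateWays (wordLen : Int) (maxVowels : Int) : Prop :=
  maxVowels ≥ wordLen ∨ 0 ≤ maxVowels
instance (wordLen : Int) (maxVowels : Int) : Decidable (Pre_calculateWays wordLen maxVowels) := by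
  unfold Pre_calculateWays; infer_instance
def pvWitness_calculateWays : Int × Int := (4, 1)

def Spec_calculateWays (wordLen : Int) (maxVowels : Int) (out : Int) : Prop := out = calculateWays_alt wordLen maxVowels
instance (wordLen : Int) (maxVowels : Int) (out : Int) : Decidable (Spec_calculateWays wordLen maxVowels out) := by unfold Spec_calculateWays; infer_instance

-- ===== CLAIM (what is proved, stated in full; the proofs are below) =====
def Claim_equal_calculateWays : Prop := ∀ (wordLen : Int) (maxVowels : Int), Dom_calculateWays wordLen maxVowels → Pre_calculateWays wordLen maxVowels → Spec_calculateWays wordLen maxVowels (calculateWays wordLen maxVowels)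

-- ===== LEMMAS AND PROOFS =====

-- The common mathematical model: exact (un-modded) dp rows and their totals.
def pvM : Int := 10 ^ 9 + 7

def pvRow (K : Nat) : Nat → List Int
  | 0 => 1 :: List.replicate K 0
  | n + 1 => (21 * (pvRow K n).sum) :: ((pvRow K n).take K).map (fun x => 5 * x)

def pvS (K n : Nat) : Int := (pvRow K n).sum

theorem emodSelf (x : Int) : x % pvM ≡ x [ZMOD pvM] := Int.emod_emod_of_dvd _ dvd_rfl

theorem pvPowNatMod_correct (b : Int) (e : Nat) (m : Int) :
    pvPowNatMod b e m = b ^ e % m := by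
  induction e using Nat.strong_induction_on with
  | _ e ih =>
    rw [pvPowNatMod]
    by_cases h : e = 0
    · simp [h]
    · simp only [h, dite_false]
      rw [ih (e / 2) (Nat.div_lt_self (Nat.pos_of_ne_zero h) (by norm_num))]
      have he : e = 2 * (e / 2) + e % 2 := (Nat.div_add_mod e 2).symm
      have hb : (b ^ 2) ^ (e / 2) = b ^ (e / 2) * b ^ (e / 2) := by
        rw [← pow_mul, ← pow_add]
        congr 1
        omega
      by_cases h2 : e % 2 = 1
      · simp only [h2, if_true]
        conv_rhs => rw [he, h2, pow_add, pow_mul, pow_one]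
        rw [hb, Int.mul_emod (b ^ (e / 2) * b ^ (e / 2)) b, Int.mul_emod (b ^ (e / 2)) (b ^ (e / 2))]
      · have h0 : e % 2 = 0 := by omega
        simp only [h2, if_false]
        conv_rhs => rw [he, h0, Nat.add_zero, pow_mul]
        rw [hb, Int.mul_emod (b ^ (e / 2)) (b ^ (e / 2))]

theorem pvRow_length (K n : Nat) : (pvRow K n).length = K + 1 := by
  induction n with
  | zero => simp [pvRow]
  | succ n ih => simp [pvRow, List.length_take, ih]

theorem sum_map_emod (l : List Int) (m : Int) : ((l.map (· % m)).sum) % m = l.sum % m := by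
  induction l with
  | nil => rfl
  | cons a l ih =>
    simp only [List.map_cons, List.sum_cons]
    rw [Int.add_emod, Int.emod_emod_of_dvd _ dvd_rfl, ih, ← Int.add_emod]

theorem sum_map_mul5 (l : List Int) : (l.map (fun x => 5 * x)).sum = 5 * l.sum := by
  induction l with
  | nil => simp
  | cons a l ih => simp [ih]; ring

theorem pvS_zero (K : Nat) : pvS K 0 = 1 := by
  simp [pvS, pvRow]

theorem pvRow_getD_zero (K n : Nat) : (pvRow K (n + 1)).getD 0 0 = 21 * pvS K n := by
  simp [pvRow, pvS]

theorem pvRow_getD_succ (K n j : Nat) (h : j < K) :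
    (pvRow K (n + 1)).getD (j + 1) 0 = 5 * (pvRow K n).getD j 0 := by
  have hl : (pvRow K n).length = K + 1 := pvRow_length K n
  simp only [pvRow, List.getD_cons_succ]
  rw [List.getD_eq_getElem?_getD, List.getElem?_map, List.getElem?_take]
  rw [List.getD_eq_getElem?_getD, List.getElem?_eq_getElem (by omega)]
  simp [h]

theorem pvRow_getD_shift (K m : Nat) : ∀ n j, j + m ≤ K →
    (pvRow K (n + m)).getD (j + m) 0 = 5 ^ m * (pvRow K n).getD j 0 := by
  induction m with
  | zero => intro n j _; simp
  | succ m ih =>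
    intro n j hj
    have h1 : n + (m + 1) = (n + m) + 1 := by omega
    have h2 : j + (m + 1) = (j + m) + 1 := by omega
    rw [h1, h2, pvRow_getD_succ K (n + m) (j + m) (by omega), ih n j (by omega)]
    ring

theorem pvRow_getD_last_lt (K n : Nat) (h : n < K) : (pvRow K n).getD K 0 = 0 := by
  have := pvRow_getD_shift K n 0 (K - n) (by omega)
  rw [Nat.zero_add, Nat.sub_add_cancel (by omega)] at this
  rw [this]
  have h1 : K - n = (K - n - 1) + 1 := by omega
  rw [h1]
  simp [pvRow]

theorem pvRow_getD_last_ge (K n : Nat) (h : K ≤ n) :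
    (pvRow K n).getD K 0 = 5 ^ K * (pvRow K (n - K)).getD 0 0 := by
  have := pvRow_getD_shift K K (n - K) 0 (by omega)
  rw [Nat.sub_add_cancel h, Nat.zero_add] at this
  exact this

theorem pvS_succ (K n : Nat) :
    pvS K (n + 1) = 26 * pvS K n - 5 * (pvRow K n).getD K 0 := by
  have hl : (pvRow K n).length = K + 1 := pvRow_length K n
  have hd : (pvRow K n).drop K = [(pvRow K n).getD K 0] := by
    rw [List.drop_eq_getElem_cons (by omega)]
    rw [List.getD_eq_getElem?_getD, List.getElem?_eq_getElem (by omega)]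
    simp [List.drop_eq_nil_of_le (by omega : (pvRow K n).length ≤ K + 1)]
  have hsplit : (pvRow K n).sum = ((pvRow K n).take K).sum + (pvRow K n).getD K 0 := by
    conv_lhs => rw [← List.take_append_drop K (pvRow K n)]
    rw [List.sum_append, hd]
    simp
  simp only [pvS, pvRow, List.sum_cons]
  rw [sum_map_mul5]
  omega

theorem pvS_rec_low (K n : Nat) (h : n < K) : pvS K (n + 1) = 26 * pvS K n := by
  rw [pvS_succ, pvRow_getD_last_lt K n h]
  ring

theorem pvS_rec_mid (K : Nat) : pvS K (K + 1) = 26 * pvS K K - 5 ^ (K + 1) := by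
  rw [pvS_succ, pvRow_getD_last_ge K K le_rfl]
  simp [pvRow, pow_succ]
  ring

theorem pvS_rec_high (K n : Nat) (h : K < n) :
    pvS K (n + 1) = 26 * pvS K n - 21 * 5 ^ (K + 1) * pvS K (n - K - 1) := by
  rw [pvS_succ, pvRow_getD_last_ge K n (by omega)]
  have h1 : n - K = (n - K - 1) + 1 := by omega
  rw [h1, pvRow_getD_zero]
  rw [show n - K - 1 + 1 - 1 = n - K - 1 by omega] at *
  rw [pow_succ]
  ring

-- A's dp after processing positions 1..p
def pvMrow (K n : Nat) : List Int := (pvRow K n).map (· % pvM)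
def pvZrow (K : Nat) : List Int := List.replicate (K + 1) (0 : Int)
def pvDpAt (K W p : Nat) : List (List Int) :=
  (List.range (p + 1)).map (pvMrow K) ++ List.replicate (W - p) (pvZrow K)
-- A's dp in the middle of processing position p+1, with the fresh row r
def pvMid (K W p : Nat) (r : List Int) : List (List Int) :=
  (List.range (p + 1)).map (pvMrow K) ++ r :: List.replicate (W - p - 1) (pvZrow K)
-- the fresh row after the inner loop has run for cv = 1..j
def pvPRow (K p j : Nat) : List Int :=
  (pvS K p % pvM * 21 % pvM) ::
    ((List.range j).map (fun i => (pvRow K p).getD i 0 % pvM * 5 % pvM) ++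
      List.replicate (K - j) (0 : Int))

theorem pvMrow_getD (K n j : Nat) (h : j ≤ K) :
    (pvMrow K n).getD j 0 = (pvRow K n).getD j 0 % pvM := by
  have hl := pvRow_length K n
  unfold pvMrow
  rw [List.getD_eq_getElem?_getD, List.getElem?_map, List.getElem?_eq_getElem (by omega)]
  rw [List.getD_eq_getElem?_getD, List.getElem?_eq_getElem (by omega)]
  rfl

theorem pvDpAt_get_le (K W p i : Nat) (hi : i ≤ p) :
    (pvDpAt K W p).getD i [] = pvMrow K i := by
  unfold pvDpAt
  rw [List.getD_eq_getElem?_getD, List.getElem?_append_left (by simp; omega),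
    List.getElem?_map, List.getElem?_range (by omega)]
  rfl

theorem pvDpAt_get_gt (K W p i : Nat) (hp : p < i) (hi : i ≤ W) :
    (pvDpAt K W p).getD i [] = pvZrow K := by
  unfold pvDpAt
  rw [List.getD_eq_getElem?_getD, List.getElem?_append_right (by simp; omega)]
  rw [List.getElem?_replicate]
  simp only [List.length_map, List.length_range]
  rw [if_pos (by omega)]
  rfl

theorem pvDpAt_set (K W p : Nat) (hp : p < W) (r : List Int) :
    (pvDpAt K W p).set (p + 1) r = pvMid K W p r := by
  unfold pvDpAt pvMid
  rw [List.set_append_right _ _ (by simp)]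
  simp only [List.length_map, List.length_range]
  rw [show p + 1 - (p + 1) = 0 by omega,
    show W - p = (W - p - 1) + 1 by omega, List.replicate_succ, List.set_cons_zero]
  simp

theorem pvMid_get_prev (K W p : Nat) (r : List Int) :
    PySem.List.pyGetD (pvMid K W p r) ((p : Nat) : Int) [] = pvMrow K p := by
  rw [PySem.List.pyGetD_natCast]
  unfold pvMid
  rw [List.getD_eq_getElem?_getD, List.getElem?_append_left (by simp),
    List.getElem?_map, List.getElem?_range (by omega)]
  rfl

theorem pvMid_get_cur (K W p : Nat) (r : List Int) :
    PySem.List.pyGetD (pvMid K W p r) (((p : Nat) : Int) + 1) [] = r := by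
  rw [show (((p : Nat) : Int) + 1) = (((p + 1 : Nat) : Nat) : Int) by push_cast; ring]
  rw [PySem.List.pyGetD_natCast]
  unfold pvMid
  rw [List.getD_eq_getElem?_getD, List.getElem?_append_right (by simp)]
  simp

theorem pvMid_set_cur (K W p : Nat) (r r' : List Int) :
    PySem.List.pySetD (pvMid K W p r) (((p : Nat) : Int) + 1) r' = pvMid K W p r' := by
  rw [show (((p : Nat) : Int) + 1) = (((p + 1 : Nat) : Nat) : Int) by push_cast; ring]
  rw [PySem.List.pySetD_natCast]
  unfold pvMid
  rw [List.set_append_right _ _ (by simp)]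
  simp only [List.length_map, List.length_range]
  rw [show p + 1 - (p + 1) = 0 by omega, List.set_cons_zero]

theorem pvPRow_zero (K p : Nat) :
    pvPRow K p 0 = pvS K p % pvM * 21 % pvM :: List.replicate K (0 : Int) := by
  simp [pvPRow]

theorem pvPRow_set (K p j : Nat) (h : j < K) :
    (pvPRow K p j).set (j + 1) ((pvRow K p).getD j 0 % pvM * 5 % pvM) = pvPRow K p (j + 1) := by
  unfold pvPRow
  rw [List.set_cons_succ, List.set_append_right _ _ (by simp)]
  simp only [List.length_map, List.length_range]
  rw [show j - j = 0 by omega, show K - j = (K - j - 1) + 1 by omega,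
    List.replicate_succ, List.set_cons_zero, List.range_succ, List.map_append]
  simp [show K - j - 1 = K - (j + 1) by omega]

theorem pvPRow_last (K p : Nat) : pvPRow K p K = pvMrow K (p + 1) := by
  have hl := pvRow_length K p
  unfold pvPRow pvMrow
  rw [show pvRow K (p + 1) = (21 * (pvRow K p).sum) :: ((pvRow K p).take K).map (fun x => 5 * x) from rfl]
  rw [List.map_cons]
  congr 1
  · show pvS K p % pvM * 21 % pvM = 21 * (pvRow K p).sum % pvM
    calc pvS K p % pvM * 21 % pvM = pvS K p * 21 % pvM :=
          Int.ModEq.mul_right 21 (emodSelf _)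
      _ = 21 * (pvRow K p).sum % pvM := by rw [mul_comm]; rfl
  · rw [Nat.sub_self, List.replicate_zero, List.append_nil, List.map_map]
    apply List.ext_getElem
    · simp
      omega
    · intro i h1 h2
      simp only [List.getElem_map, List.getElem_range, List.getElem_take, Function.comp_apply]
      have h1' : i < K := by simpa using h1
      rw [List.getD_eq_getElem?_getD, List.getElem?_eq_getElem (by omega)]
      show (pvRow K p)[i] % pvM * 5 % pvM = 5 * (pvRow K p)[i] % pvM
      calc (pvRow K p)[i] % pvM * 5 % pvM = (pvRow K p)[i] * 5 % pvM :=
            Int.ModEq.mul_right 5 (emodSelf _)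
        _ = _ := by rw [mul_comm]

theorem pvMid_to_dpAt (K W p : Nat) :
    pvMid K W p (pvMrow K (p + 1)) = pvDpAt K W (p + 1) := by
  unfold pvMid pvDpAt
  conv_rhs => rw [List.range_succ, show W - (p + 1) = W - p - 1 from by omega]
  rw [List.map_append, List.map_cons, List.map_nil, List.append_assoc]
  rfl

theorem pvMrow_zero (K : Nat) : pvMrow K 0 = 1 :: List.replicate K (0 : Int) := by
  unfold pvMrow pvRow
  rw [List.map_cons, List.map_replicate]
  norm_num [pvM]

theorem aInner (K W p : Nat) : ∀ j, j ≤ K →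
    (PySem.List.pyRange 1 ((j : Int) + 1) 1).foldl (fun dp cv =>
        PySem.List.pySetD dp (((p : Nat) : Int) + 1)
          (PySem.List.pySetD (PySem.List.pyGetD dp (((p : Nat) : Int) + 1) []) cv
            ((PySem.List.pyGetD (PySem.List.pyGetD dp ((p : Nat) : Int) []) (cv - 1) 0 * 5) % pvM)))
      (pvMid K W p (pvPRow K p 0)) = pvMid K W p (pvPRow K p j) := by
  intro j
  induction j with
  | zero =>
    intro _
    rw [show ((0 : Nat) : Int) + 1 = 1 by norm_num, PySem.List.pyRange_one_eq_nil le_rfl]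
    rfl
  | succ j ih =>
    intro hj
    have hc : (((j : Nat) + 1 : Nat) : Int) + 1 = ((j : Nat) : Int) + 1 + 1 := by push_cast; ring
    rw [hc, PySem.List.pyRange_one_succ_right (by omega), List.foldl_append,
      ih (by omega), List.foldl_cons, List.foldl_nil]
    rw [pvMid_get_prev, pvMid_get_cur]
    rw [show ((j : Nat) : Int) + 1 - 1 = ((j : Nat) : Int) by ring]
    rw [PySem.List.pyGetD_natCast, pvMrow_getD K p j (by omega)]
    have hset1 : PySem.List.pySetD (pvPRow K p j) (((j : Nat) : Int) + 1)
        ((pvRow K p).getD j 0 % pvM * 5 % pvM) = pvPRow K p (j + 1) := by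
      rw [show (((j : Nat) : Int) + 1) = (((j + 1 : Nat) : Nat) : Int) by push_cast; ring,
        PySem.List.pySetD_natCast, pvPRow_set K p j (by omega)]
    rw [hset1, pvMid_set_cur]

theorem aFold (K W : Nat) (p : Nat) (hp : p ≤ W) :
    (PySem.List.pyRange 1 ((p : Int) + 1) 1).foldl (fun dp pos =>
      let total_prev := (PySem.List.pyGetD dp (pos - 1) []).sum % pvM
      let dp := PySem.List.pySetD dp pos
        (PySem.List.pySetD (PySem.List.pyGetD dp pos []) 0 ((total_prev * 21) % pvM))
      (PySem.List.pyRange 1 ((K : Int) + 1) 1).foldl (fun dp cv =>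
        PySem.List.pySetD dp pos
          (PySem.List.pySetD (PySem.List.pyGetD dp pos []) cv
            ((PySem.List.pyGetD (PySem.List.pyGetD dp (pos - 1) []) (cv - 1) 0 * 5) % pvM))) dp)
      (pvDpAt K W 0) = pvDpAt K W p := by
  induction p with
  | zero =>
    rw [show ((0 : Nat) : Int) + 1 = 1 by norm_num, PySem.List.pyRange_one_eq_nil le_rfl]
    rfl
  | succ p ih =>
    have hc : (((p : Nat) + 1 : Nat) : Int) + 1 = ((p : Nat) : Int) + 1 + 1 := by push_cast; ring
    rw [hc, PySem.List.pyRange_one_succ_right (a := 1) (b := ((p : Nat) : Int) + 1) (by omega),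
      List.foldl_append, ih (by omega), List.foldl_cons, List.foldl_nil]
    rw [show (((p : Nat) : Int) + 1 - 1) = ((p : Nat) : Int) by ring]
    have hprev : PySem.List.pyGetD (pvDpAt K W p) ((p : Nat) : Int) [] = pvMrow K p := by
      rw [PySem.List.pyGetD_natCast, pvDpAt_get_le K W p p le_rfl]
    have hcur : PySem.List.pyGetD (pvDpAt K W p) (((p : Nat) : Int) + 1) [] = pvZrow K := by
      rw [show (((p : Nat) : Int) + 1) = (((p + 1 : Nat) : Nat) : Int) by push_cast; ring,
        PySem.List.pyGetD_natCast, pvDpAt_get_gt K W p (p + 1) (by omega) (by omega)]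
    rw [hprev, hcur]
    have hsum : (pvMrow K p).sum % pvM = pvS K p % pvM := sum_map_emod _ _
    rw [hsum]
    have hrow0 : PySem.List.pySetD (pvZrow K) 0 (pvS K p % pvM * 21 % pvM) = pvPRow K p 0 := by
      rw [show (0 : Int) = ((0 : Nat) : Int) by norm_num, PySem.List.pySetD_natCast]
      unfold pvZrow
      rw [List.replicate_succ, List.set_cons_zero, pvPRow_zero]
    dsimp only
    rw [hrow0]
    have hset : PySem.List.pySetD (pvDpAt K W p) (((p : Nat) : Int) + 1) (pvPRow K p 0)
        = pvMid K W p (pvPRow K p 0) := by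
      rw [show (((p : Nat) : Int) + 1) = (((p + 1 : Nat) : Nat) : Int) by push_cast; ring,
        PySem.List.pySetD_natCast, pvDpAt_set K W p (by omega)]
    rw [hset, aInner K W p K le_rfl, pvPRow_last, pvMid_to_dpAt]

theorem getD_map_range_f (f : Nat → Int) (n k : Nat) (h : k < n) (d : Int) :
    ((List.range n).map f).getD k d = f k := by
  rw [List.getD_eq_getElem?_getD, List.getElem?_map, List.getElem?_range h]
  rfl

theorem bFold (K W : Nat) (p5 : Int) (hp5 : p5 = 5 ^ (K + 1) % pvM) (p : Nat) (hp : p ≤ W) :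
    (PySem.List.pyRange 1 ((p : Int) + 1) 1).foldl (fun T n =>
      let t := 26 * PySem.List.pyGetD T (n - 1) 0
      let t := if n = (K : Int) + 1 then t - p5
               else if n > (K : Int) + 1 then
                 t - 21 * p5 * PySem.List.pyGetD T (n - (K : Int) - 2) 0
               else t
      T ++ [t % pvM]) [1] = (List.range (p + 1)).map (fun i => pvS K i % pvM) := by
  induction p with
  | zero =>
    rw [show ((0:Nat):Int) + 1 = 1 by norm_num, PySem.List.pyRange_one_eq_nil le_rfl]
    simp only [List.foldl_nil]
    norm_num [pvS_zero, pvM]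
  | succ p ih =>
    have hc : (((p:Nat) + 1 : Nat) : Int) + 1 = ((p:Nat):Int) + 1 + 1 := by push_cast; ring
    rw [hc, PySem.List.pyRange_one_succ_right (by omega), List.foldl_append,
      ih (by omega), List.foldl_cons, List.foldl_nil]
    have hi1 : ((p:Nat):Int) + 1 - 1 = ((p:Nat):Int) := by ring
    rw [hi1]
    have hg1 : PySem.List.pyGetD ((List.range (p + 1)).map (fun i => pvS K i % pvM)) ((p:Nat):Int) 0
        = pvS K p % pvM := by
      rw [PySem.List.pyGetD_natCast, getD_map_range_f _ _ _ (by omega)]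
    rw [hg1]
    have hout : List.range (p + 1 + 1) = List.range (p + 1) ++ [p + 1] := List.range_succ
    rw [hout, List.map_append, List.map_cons, List.map_nil]
    simp only [gt_iff_lt]
    congr 1
    congr 1
    rcases lt_trichotomy p K with hlt | heq | hgt
    · rw [if_neg (by omega), if_neg (by omega)]
      rw [pvS_rec_low K p hlt]
      exact (Int.ModEq.mul_left 26 (emodSelf _))
    · rw [if_pos (by omega)]
      rw [heq, pvS_rec_mid K, hp5]
      exact Int.ModEq.sub (Int.ModEq.mul_left 26 (emodSelf _)) (emodSelf _)
    · rw [if_neg (by omega), if_pos (by omega)]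
      have hidx : ((p:Nat):Int) + 1 - (K:Int) - 2 = (((p - K - 1 : Nat)) : Int) := by omega
      rw [hidx, PySem.List.pyGetD_natCast, getD_map_range_f _ _ _ (by omega)]
      rw [pvS_rec_high K p hgt, hp5]
      have h21 : 21 * (5 ^ (K + 1) % pvM) * (pvS K (p - K - 1) % pvM)
          ≡ 21 * 5 ^ (K + 1) * pvS K (p - K - 1) [ZMOD pvM] :=
        Int.ModEq.mul (Int.ModEq.mul_left 21 (emodSelf _)) (emodSelf _)
      exact Int.ModEq.sub (Int.ModEq.mul_left 26 (emodSelf _)) h21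

-- ===== VERDICT (by name: the statement is the Claim_ definition above) =====
theorem calculateWays_spec : Claim_equal_calculateWays := by
  intro w m hdom hpre
  unfold Spec_calculateWays calculateWays calculateWays_alt
  by_cases hge : m ≥ w
  · rw [if_pos hge, if_pos hge]
  · have hm0 : 0 ≤ m := by
      rcases hpre with h | h
      · exact absurd h hge
      · exact h
    obtain ⟨K, rfl⟩ : ∃ K : Nat, m = (K : Int) := ⟨m.toNat, by omega⟩
    obtain ⟨W, rfl⟩ : ∃ W : Nat, w = (W : Int) := ⟨w.toNat, by omega⟩
    have hKW : K < W := by omega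
    rw [show (10 ^ 9 + 7 : Int) = pvM from rfl]
    rw [if_neg hge, if_neg hge]
    dsimp only
    -- initial dp of A is pvDpAt K W 0
    have hT1 : (((W : Int)) + 1).toNat = W + 1 := by omega
    have hT2 : (((K : Int)) + 1).toNat = K + 1 := by omega
    rw [hT1, hT2]
    have hget0 : PySem.List.pyGetD
        (List.replicate (W + 1) (List.replicate (K + 1) (0 : Int))) 0 [] =
        List.replicate (K + 1) (0 : Int) := by
      rw [List.replicate_succ, PySem.List.pyGetD_zero, List.getD_cons_zero]
    rw [hget0]
    have hset00 : PySem.List.pySetD (List.replicate (K + 1) (0 : Int)) 0 1 =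
        (1 : Int) :: List.replicate K 0 := by
      rw [show (0 : Int) = ((0 : Nat) : Int) from rfl, PySem.List.pySetD_natCast,
        List.replicate_succ, List.set_cons_zero]
    rw [hset00]
    have hinit : PySem.List.pySetD
        (List.replicate (W + 1) (List.replicate (K + 1) (0 : Int))) 0
        ((1 : Int) :: List.replicate K 0) = pvDpAt K W 0 := by
      rw [show (0 : Int) = ((0 : Nat) : Int) from rfl, PySem.List.pySetD_natCast,
        List.replicate_succ, List.set_cons_zero]
      unfold pvDpAt pvZrow
      rw [List.range_one, List.map_cons, List.map_nil, pvMrow_zero]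
      simp
    rw [hinit, aFold K W W le_rfl]
    -- A's result
    have hlast : PySem.List.pyGetD (pvDpAt K W W) ((W : Nat) : Int) [] = pvMrow K W := by
      rw [PySem.List.pyGetD_natCast, pvDpAt_get_le K W W W le_rfl]
    rw [hlast, show (pvMrow K W).sum % pvM = pvS K W % pvM from sum_map_emod _ _]
    -- B side
    have hp5 : pyPowMod 5 (((K : Nat) : Int) + 1) pvM = 5 ^ (K + 1) % pvM := by
      unfold pyPowMod
      rw [if_pos (by omega), hT2, pvPowNatMod_correct 5 (K + 1) pvM]
    rw [hp5, bFold K W (5 ^ (K + 1) % pvM) rfl W le_rfl]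
    rw [PySem.List.pyGetD_natCast, getD_map_range_f _ _ _ (by omega)]
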